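-- pv_equiv track=rewrite | github.com/Natural-Goldfish/Algorithm | BAEKJOON/# 3055 [탈출].py | rain_controller
-- ===== SOURCE A (Python) =====
-- import sys, copy
--
-- def rain_controller(arr, ready='*', ready_flag=False, rain='+', rain_flag=False):
--     new_arr = copy.deepcopy(arr)
--     for y in range(len(arr)):
--         for x in range(len(arr[0])):
--             if arr[y][x] == ready and ready_flag :
--                 for dy, dx in [(-1, 0), (1, 0), (0, -1), (0, 1)]:
--                     if y+dy < 0 or y+dy >= len(arr) or x+dx < 0 or x+dx >= len(arr[0]):continue
--                     if arr[y+dy][x+dx] == '.' :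
--                         new_arr[y+dy][x+dx] = '+'
--             if arr[y][x] == rain and rain_flag :
--                 new_arr[y][x] = '*'
--     return new_arr
-- ===== SOURCE B (Python) =====
-- def rain_controller(arr, ready='*', ready_flag=False, rain='+', rain_flag=False):
--     height = len(arr)
--     width = len(arr[0]) if arr else 0
--
--     def next_cell(y, x):
--         c = arr[y][x]
--         if c == '.' and ready_flag and any(
--                 arr[ny][nx] == ready
--                 for ny, nx in ((y - 1, x), (y + 1, x), (y, x - 1), (y, x + 1))
--                 if 0 <= ny < height and 0 <= nx < width):
--             return '+'
--         if c == rain and rain_flag: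
--             return '*'
--         return c
--
--     result = []
--     for y, row in enumerate(arr):
--         new_row = list(row)
--         for x in range(width):
--             new_row[x] = next_cell(y, x)
--         result.append(new_row)
--     return result
-- ===== Notes on version B (the rewrite author's own statement) =====
-- stated objective: alternative
-- what changed: A scatters: it sweeps the grid and pushes '+' writes into the four neighbours of every ready cell inside a mutated copy; B gathers: each output cell is computed directly from the cell and its four neighbours in the original grid. Pre_ excludes grids with a row shorter than the first row (A raises IndexError there) and the corner rain='.' with both flags set where a '.' cell has a ready neighbour, where the result depends on A's accidental row-major write order and either value is defensible.
-- outside the precondition, e.g. on rain_controller([['*', '.']], '*', True, '.', True): A returns [['*', '*']], B returns [['*', '+']]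
import Mathlib
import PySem

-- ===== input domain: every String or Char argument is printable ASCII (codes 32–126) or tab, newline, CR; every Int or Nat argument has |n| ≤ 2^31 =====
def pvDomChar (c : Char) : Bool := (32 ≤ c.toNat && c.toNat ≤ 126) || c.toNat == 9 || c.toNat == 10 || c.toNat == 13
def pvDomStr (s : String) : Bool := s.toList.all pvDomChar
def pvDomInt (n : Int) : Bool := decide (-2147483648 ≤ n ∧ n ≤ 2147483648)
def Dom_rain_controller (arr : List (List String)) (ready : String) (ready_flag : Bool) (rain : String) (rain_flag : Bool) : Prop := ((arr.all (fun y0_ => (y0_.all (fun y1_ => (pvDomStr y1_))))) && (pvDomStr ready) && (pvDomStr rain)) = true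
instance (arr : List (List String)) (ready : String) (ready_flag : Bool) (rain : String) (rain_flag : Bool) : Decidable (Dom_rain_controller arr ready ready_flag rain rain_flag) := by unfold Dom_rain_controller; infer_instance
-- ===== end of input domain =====

-- B rewrites A's push-style one-step flood update (scatter writes into a mutated copy of the grid)
-- as a pull-style per-cell computation (each cell gathers from its four neighbours); objective: alternative.

-- ===== PORT A =====
-- arr[i][j] read (every index A uses is produced by range/bounds checks, so plain getD is exact here)
def pvGGet (g : List (List String)) (i j : Nat) : String := (g.getD i []).getD j ""
-- new_arr[i][j] = v (A only executes this with i, j in bounds)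
def pvGSet (g : List (List String)) (i j : Nat) (v : String) : List (List String) :=
  g.set i ((g.getD i []).set j v)

-- body of A's neighbour loop: bounds check ('continue') then conditional write of '+'
def pvTouch (arr g : List (List String)) (H W : Nat) (ny nx : Int) : List (List String) :=
  if ny < 0 ∨ (H : Int) ≤ ny ∨ nx < 0 ∨ (W : Int) ≤ nx then g
  else if pvGGet arr ny.toNat nx.toNat == "." then pvGSet g ny.toNat nx.toNat "+" else g

-- body of A's inner loop for one cell (y, x)
def pvStepA (arr : List (List String)) (ready : String) (ready_flag : Bool)
    (rain : String) (rain_flag : Bool) (H W : Nat)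
    (g : List (List String)) (y x : Nat) : List (List String) :=
  let g1 :=
    if pvGGet arr y x == ready && ready_flag then
      [((-1 : Int), (0 : Int)), (1, 0), (0, -1), (0, 1)].foldl
        (fun g d => pvTouch arr g H W ((y : Int) + d.1) ((x : Int) + d.2)) g
    else g
  if pvGGet arr y x == rain && rain_flag then pvGSet g1 y x "*" else g1

def rain_controller (arr : List (List String)) (ready : String) (ready_flag : Bool) (rain : String) (rain_flag : Bool) : List (List String) :=
  -- new_arr = copy.deepcopy(arr); Lean lists are immutable, so the copy is arr itself
  (List.range arr.length).foldl
    (fun g y =>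
      (List.range ((arr.getD 0 []).length)).foldl
        (fun g x => pvStepA arr ready ready_flag rain rain_flag arr.length ((arr.getD 0 []).length) g y x) g)
    arr

-- ===== PORT B =====
-- any(arr[ny][nx] == ready for ny, nx in the four neighbours if in bounds)
def pvHasReadyNbr (arr : List (List String)) (ready : String) (H W : Nat) (y x : Nat) : Bool :=
  [((y : Int) - 1, (x : Int)), ((y : Int) + 1, (x : Int)), ((y : Int), (x : Int) - 1), ((y : Int), (x : Int) + 1)].any (fun d =>
    decide (0 ≤ d.1) && decide (d.1 < (H : Int)) &&
    decide (0 ≤ d.2) && decide (d.2 < (W : Int)) &&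
    (pvGGet arr d.1.toNat d.2.toNat == ready))

-- B's next_cell(y, x)
def pvCellB (arr : List (List String)) (ready : String) (ready_flag : Bool)
    (rain : String) (rain_flag : Bool) (H W : Nat) (y x : Nat) : String :=
  let c := pvGGet arr y x
  if c == "." && ready_flag && pvHasReadyNbr arr ready H W y x then "+"
  else if c == rain && rain_flag then "*"
  else c

def rain_controller_alt (arr : List (List String)) (ready : String) (ready_flag : Bool) (rain : String) (rain_flag : Bool) : List (List String) :=
  -- height = len(arr); width = len(arr[0]) if arr else 0  ((arr.getD 0 []).length is 0 exactly when arr is empty)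
  -- for y, row in enumerate(arr): new_row = list(row); for x in range(width): new_row[x] = next_cell(y, x)
  (PySem.List.enumerate arr).map (fun p =>
    (List.range ((arr.getD 0 []).length)).foldl
      (fun r x => r.set x (pvCellB arr ready ready_flag rain rain_flag arr.length ((arr.getD 0 []).length) p.1.toNat x))
      p.2)

-- ===== PRECONDITION & SPEC =====
-- Pre_ excludes (a) grids with a row shorter than the first row — A raises IndexError there
-- (rows longer than the first are admitted), and (b) inputs with rain = '.' and both flags set
-- where some '.' cell has a ready neighbour: there the result depends on A's accidental
-- row-major write order ('+' pushed by a neighbour vs '*' written over it), and either outcome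
-- is defensible.
def Pre_rain_controller (arr : List (List String)) (ready : String) (ready_flag : Bool) (rain : String) (rain_flag : Bool) : Prop :=
  (∀ row ∈ arr, (arr.getD 0 []).length ≤ row.length) ∧
  ¬(rain = "." ∧ rain_flag = true ∧ ready_flag = true ∧
      ∃ y < arr.length, ∃ x < (arr.getD 0 []).length,
        pvGGet arr y x = "." ∧
        pvHasReadyNbr arr ready arr.length ((arr.getD 0 []).length) y x = true)
instance (arr : List (List String)) (ready : String) (ready_flag : Bool) (rain : String) (rain_flag : Bool) : Decidable (Pre_rain_controller arr ready ready_flag rain rain_flag) := by unfold Pre_rain_controller; infer_instance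

def pvWitness_rain_controller : List (List String) × String × Bool × String × Bool :=
  ([[".", "*"], ["+", "."]], "*", true, "+", true)

def Spec_rain_controller (arr : List (List String)) (ready : String) (ready_flag : Bool) (rain : String) (rain_flag : Bool) (out : List (List String)) : Prop := out = rain_controller_alt arr ready ready_flag rain rain_flag
instance (arr : List (List String)) (ready : String) (ready_flag : Bool) (rain : String) (rain_flag : Bool) (out : List (List String)) : Decidable (Spec_rain_controller arr ready ready_flag rain rain_flag out) := by unfold Spec_rain_controller; infer_instance

-- ===== CLAIM (what is proved, stated in full; the proofs are below) =====
def Claim_equal_rain_controller : Prop := ∀ (arr : List (List String)) (ready : String) (ready_flag : Bool) (rain : String) (rain_flag : Bool), Dom_rain_controller arr ready ready_flag rain rain_flag → Pre_rain_controller arr ready ready_flag rain rain_flag → Spec_rain_controller arr ready ready_flag rain rain_flag (rain_controller arr ready ready_flag rain rain_flag)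

-- ===== LEMMAS AND PROOFS =====

-- (y, x) and (i, j) are four-neighbours
def pvNbr (y x i j : Nat) : Prop :=
  (i + 1 = y ∧ j = x) ∨ (i = y + 1 ∧ j = x) ∨ (i = y ∧ j + 1 = x) ∨ (i = y ∧ j = x + 1)

-- visiting cell c in A's sweep writes into position (i, j)
def pvWrites (arr : List (List String)) (ready : String) (ready_flag : Bool)
    (rain : String) (rain_flag : Bool) (c : Nat × Nat) (i j : Nat) : Prop :=
  (ready_flag = true ∧ pvGGet arr c.1 c.2 = ready ∧ pvNbr c.1 c.2 i j ∧ pvGGet arr i j = ".")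
  ∨ (i = c.1 ∧ j = c.2 ∧ rain_flag = true ∧ pvGGet arr i j = rain)

-- the (under Pre_ unique) value any write into (i, j) stores
def pvVal (arr : List (List String)) (ready : String) (ready_flag : Bool) (H W i j : Nat) : String :=
  if pvGGet arr i j = "." ∧ ready_flag = true ∧ pvHasReadyNbr arr ready H W i j = true then "+" else "*"

-- invariant of A's sweep after processing the cells of P
def pvInv (arr : List (List String)) (ready : String) (ready_flag : Bool)
    (rain : String) (rain_flag : Bool) (P : List (Nat × Nat)) (g : List (List String)) : Prop :=
  g.length = arr.length ∧
  (∀ i, (g.getD i []).length = (arr.getD i []).length) ∧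
  (∀ i j, i < arr.length → j < (arr.getD 0 []).length →
    ((∃ c ∈ P, pvWrites arr ready ready_flag rain rain_flag c i j) →
        pvGGet g i j = pvVal arr ready ready_flag arr.length ((arr.getD 0 []).length) i j) ∧
    ((¬ ∃ c ∈ P, pvWrites arr ready ready_flag rain rain_flag c i j) →
        pvGGet g i j = pvGGet arr i j)) ∧
  (∀ i j, (arr.getD 0 []).length ≤ j → pvGGet g i j = pvGGet arr i j)

theorem pvRowLen_gSet (g : List (List String)) (y x i : Nat) (v : String) :
    ((pvGSet g y x v).getD i []).length = (g.getD i []).length := by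
  simp only [pvGSet, List.getD_eq_getElem?_getD]
  by_cases h : i = y
  · subst h
    by_cases hy : i < g.length
    · simp [List.getElem?_set_self, hy]
    · rw [List.set_eq_of_length_le (by omega)]
  · rw [List.getElem?_set_ne (by omega)]

theorem pvGGet_gSet (g : List (List String)) (y x i j : Nat) (v : String)
    (hy : y < g.length) (hx : x < (g.getD y []).length) :
    pvGGet (pvGSet g y x v) i j = if i = y ∧ j = x then v else pvGGet g i j := by
  rw [List.getD_eq_getElem?_getD] at hx
  simp only [pvGGet, pvGSet, List.getD_eq_getElem?_getD]
  by_cases h : i = y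
  · subst h
    rw [List.getElem?_set_self hy]
    simp only [Option.getD_some]
    by_cases hj : j = x
    · subst hj
      rw [List.getElem?_set_self hx]
      simp
    · rw [List.getElem?_set_ne (by omega)]
      simp [hj]
  · rw [List.getElem?_set_ne (by omega)]
    simp [h]

theorem pvGGet_gSet_ne (g : List (List String)) (y x i j : Nat) (v : String)
    (h : ¬(i = y ∧ j = x)) :
    pvGGet (pvGSet g y x v) i j = pvGGet g i j := by
  simp only [pvGGet, pvGSet, List.getD_eq_getElem?_getD]
  by_cases hiy : i = y
  · subst hiy
    have hj : j ≠ x := by tauto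
    by_cases hy : i < g.length
    · rw [List.getElem?_set_self hy]
      simp only [Option.getD_some]
      rw [List.getElem?_set_ne (by omega)]
    · rw [List.set_eq_of_length_le (by omega)]
  · rw [List.getElem?_set_ne (by omega)]

theorem pvLen_gSet (g : List (List String)) (y x : Nat) (v : String) :
    (pvGSet g y x v).length = g.length := by
  simp [pvGSet]

theorem pvLen_touch (arr g : List (List String)) (H W : Nat) (ny nx : Int) :
    (pvTouch arr g H W ny nx).length = g.length := by
  unfold pvTouch
  split_ifs with h1 h2
  · rfl
  · exact pvLen_gSet g ny.toNat nx.toNat "+"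
  · rfl

theorem pvRowLen_touch (arr g : List (List String)) (H W : Nat) (ny nx : Int) (i : Nat) :
    ((pvTouch arr g H W ny nx).getD i []).length = (g.getD i []).length := by
  unfold pvTouch
  split_ifs with h1 h2
  · rfl
  · exact pvRowLen_gSet g ny.toNat nx.toNat i "+"
  · rfl

theorem pvGGet_touch (arr g : List (List String)) (H W : Nat) (ny nx : Int) (i j : Nat)
    (hH : H = arr.length) (hW : ∀ t, t < arr.length → W ≤ (arr.getD t []).length)
    (hlen : g.length = arr.length) (hrl : ∀ t, (g.getD t []).length = (arr.getD t []).length) :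
    pvGGet (pvTouch arr g H W ny nx) i j =
      if ny = (i : Int) ∧ nx = (j : Int) ∧ i < H ∧ j < W ∧ pvGGet arr i j = "."
      then "+" else pvGGet g i j := by
  unfold pvTouch
  by_cases hout : ny < 0 ∨ (H : Int) ≤ ny ∨ nx < 0 ∨ (W : Int) ≤ nx
  · rw [if_pos hout, if_neg]
    rintro ⟨h1, h2, h3, h4, _⟩
    omega
  · rw [if_neg hout]
    push_neg at hout
    obtain ⟨o1, o2, o3, o4⟩ := hout
    by_cases heq : ny = (i : Int) ∧ nx = (j : Int)
    · obtain ⟨h1, h2⟩ := heq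
      have hti : ny.toNat = i := by omega
      have htj : nx.toNat = j := by omega
      rw [hti, htj]
      by_cases hdot : pvGGet arr i j = "."
      · rw [if_pos (by simpa using hdot), if_pos ⟨h1, h2, by omega, by omega, hdot⟩,
          pvGGet_gSet g i j i j "+" (by omega) (by rw [hrl]; have := hW i (by omega); omega)]
        simp
      · rw [if_neg (by simpa using hdot), if_neg (by rintro ⟨_, _, _, _, hd⟩; exact hdot hd)]
    · have hne : ¬(i = ny.toNat ∧ j = nx.toNat) := by omega
      by_cases hdot : (pvGGet arr ny.toNat nx.toNat == ".") = true
      · rw [if_pos hdot, pvGGet_gSet_ne g ny.toNat nx.toNat i j "+" hne,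
          if_neg (by rintro ⟨a1, a2, _⟩; exact heq ⟨a1, a2⟩)]
      · rw [if_neg hdot, if_neg (by rintro ⟨a1, a2, _⟩; exact heq ⟨a1, a2⟩)]

-- cells with column index ≥ W are never written by pvTouch
theorem pvGGet_touch_hi (arr g : List (List String)) (H W : Nat) (ny nx : Int) (i j : Nat)
    (hj : W ≤ j) :
    pvGGet (pvTouch arr g H W ny nx) i j = pvGGet g i j := by
  unfold pvTouch
  split_ifs with h1 h2
  · rfl
  · exact pvGGet_gSet_ne g ny.toNat nx.toNat i j "+" (by push_neg at h1; omega)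
  · rfl

theorem pvHasNbr_iff (arr : List (List String)) (ready : String) (H W : Nat) (i j : Nat) :
    pvHasReadyNbr arr ready H W i j = true ↔
      ∃ p q, p < H ∧ q < W ∧ pvNbr p q i j ∧ pvGGet arr p q = ready := by
  simp only [pvHasReadyNbr, List.any_cons, List.any_nil, Bool.or_eq_true, Bool.or_false,
    Bool.and_eq_true, decide_eq_true_eq, beq_iff_eq, and_assoc]
  constructor
  · rintro (⟨h1, h2, h3, h4, h5⟩ | ⟨h1, h2, h3, h4, h5⟩ | ⟨h1, h2, h3, h4, h5⟩ | ⟨h1, h2, h3, h4, h5⟩)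
    · refine ⟨i - 1, j, by omega, by omega, Or.inr (Or.inl ⟨by omega, by omega⟩), ?_⟩
      have e1 : ((i : Int) - 1).toNat = i - 1 := by omega
      have e2 : ((j : Int)).toNat = j := by omega
      rw [e1, e2] at h5; exact h5
    · refine ⟨i + 1, j, by omega, by omega, Or.inl ⟨by omega, by omega⟩, ?_⟩
      have e1 : ((i : Int) + 1).toNat = i + 1 := by omega
      have e2 : ((j : Int)).toNat = j := by omega
      rw [e1, e2] at h5; exact h5
    · refine ⟨i, j - 1, by omega, by omega, Or.inr (Or.inr (Or.inr ⟨by omega, by omega⟩)), ?_⟩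
      have e1 : ((i : Int)).toNat = i := by omega
      have e2 : ((j : Int) - 1).toNat = j - 1 := by omega
      rw [e1, e2] at h5; exact h5
    · refine ⟨i, j + 1, by omega, by omega, Or.inr (Or.inr (Or.inl ⟨by omega, by omega⟩)), ?_⟩
      have e1 : ((i : Int)).toNat = i := by omega
      have e2 : ((j : Int) + 1).toNat = j + 1 := by omega
      rw [e1, e2] at h5; exact h5
  · rintro ⟨p, q, hp, hq, (⟨h1, h2⟩ | ⟨h1, h2⟩ | ⟨h1, h2⟩ | ⟨h1, h2⟩), hr⟩
    · -- i + 1 = p, j = q : neighbour below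
      refine Or.inr (Or.inl ⟨by omega, by omega, by omega, by omega, ?_⟩)
      have e1 : ((i : Int) + 1).toNat = p := by omega
      have e2 : ((j : Int)).toNat = q := by omega
      rw [e1, e2]; exact hr
    · -- i = p + 1, j = q : neighbour above
      refine Or.inl ⟨by omega, by omega, by omega, by omega, ?_⟩
      have e1 : ((i : Int) - 1).toNat = p := by omega
      have e2 : ((j : Int)).toNat = q := by omega
      rw [e1, e2]; exact hr
    · -- i = p, j + 1 = q : neighbour right
      refine Or.inr (Or.inr (Or.inr ⟨by omega, by omega, by omega, by omega, ?_⟩))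
      have e1 : ((i : Int)).toNat = p := by omega
      have e2 : ((j : Int) + 1).toNat = q := by omega
      rw [e1, e2]; exact hr
    · -- i = p, j = q + 1 : neighbour left
      refine Or.inr (Or.inr (Or.inl ⟨by omega, by omega, by omega, by omega, ?_⟩))
      have e1 : ((i : Int)).toNat = p := by omega
      have e2 : ((j : Int) - 1).toNat = q := by omega
      rw [e1, e2]; exact hr

-- the four-touch chain of A's ready branch, seen from one cell
theorem pvGGet_chain (arr g : List (List String)) (y x i j : Nat)
    (hW : ∀ t, t < arr.length → (arr.getD 0 []).length ≤ (arr.getD t []).length)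
    (hi : i < arr.length) (hj : j < (arr.getD 0 []).length)
    (hlen : g.length = arr.length) (hrl : ∀ t, (g.getD t []).length = (arr.getD t []).length) :
    ((pvNbr y x i j ∧ pvGGet arr i j = "." →
        pvGGet ([((-1 : Int), (0 : Int)), (1, 0), (0, -1), (0, 1)].foldl
          (fun g d => pvTouch arr g arr.length ((arr.getD 0 []).length) ((y : Int) + d.1) ((x : Int) + d.2)) g) i j = "+") ∧
     (¬(pvNbr y x i j ∧ pvGGet arr i j = ".") →
        pvGGet ([((-1 : Int), (0 : Int)), (1, 0), (0, -1), (0, 1)].foldl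
          (fun g d => pvTouch arr g arr.length ((arr.getD 0 []).length) ((y : Int) + d.1) ((x : Int) + d.2)) g) i j = pvGGet g i j)) := by
  simp only [List.foldl]
  rw [pvGGet_touch _ _ _ _ _ _ _ _ rfl hW
      (by rw [pvLen_touch, pvLen_touch, pvLen_touch, hlen])
      (fun t => by rw [pvRowLen_touch, pvRowLen_touch, pvRowLen_touch]; exact hrl t),
    pvGGet_touch _ _ _ _ _ _ _ _ rfl hW
      (by rw [pvLen_touch, pvLen_touch, hlen])
      (fun t => by rw [pvRowLen_touch, pvRowLen_touch]; exact hrl t),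
    pvGGet_touch _ _ _ _ _ _ _ _ rfl hW
      (by rw [pvLen_touch, hlen])
      (fun t => by rw [pvRowLen_touch]; exact hrl t),
    pvGGet_touch _ _ _ _ _ _ _ _ rfl hW hlen hrl]
  constructor
  · rintro ⟨hn, hdot⟩
    rcases hn with ⟨e1, e2⟩ | ⟨e1, e2⟩ | ⟨e1, e2⟩ | ⟨e1, e2⟩
    · rw [if_neg (by rintro ⟨a1, a2, _⟩; omega), if_neg (by rintro ⟨a1, a2, _⟩; omega),
        if_neg (by rintro ⟨a1, a2, _⟩; omega), if_pos ⟨by omega, by omega, hi, hj, hdot⟩]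
    · rw [if_neg (by rintro ⟨a1, a2, _⟩; omega), if_neg (by rintro ⟨a1, a2, _⟩; omega),
        if_pos ⟨by omega, by omega, hi, hj, hdot⟩]
    · rw [if_neg (by rintro ⟨a1, a2, _⟩; omega), if_pos ⟨by omega, by omega, hi, hj, hdot⟩]
    · rw [if_pos ⟨by omega, by omega, hi, hj, hdot⟩]
  · intro hD
    rw [if_neg (fun h => hD ⟨Or.inr (Or.inr (Or.inr (by omega))), h.2.2.2.2⟩),
      if_neg (fun h => hD ⟨Or.inr (Or.inr (Or.inl (by omega))), h.2.2.2.2⟩),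
      if_neg (fun h => hD ⟨Or.inr (Or.inl (by omega)), h.2.2.2.2⟩),
      if_neg (fun h => hD ⟨Or.inl (by omega), h.2.2.2.2⟩)]

-- shape preservation of one step of A's sweep
theorem pvLen_step (arr : List (List String)) (ready : String) (ready_flag : Bool)
    (rain : String) (rain_flag : Bool) (H W : Nat) (g : List (List String)) (y x : Nat) :
    (pvStepA arr ready ready_flag rain rain_flag H W g y x).length = g.length := by
  simp only [pvStepA, List.foldl]
  split_ifs with h1 h2 h3
  · rw [pvLen_gSet, pvLen_touch, pvLen_touch, pvLen_touch, pvLen_touch]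
  · rw [pvLen_gSet]
  · rw [pvLen_touch, pvLen_touch, pvLen_touch, pvLen_touch]
  · rfl

theorem pvRowLen_step (arr : List (List String)) (ready : String) (ready_flag : Bool)
    (rain : String) (rain_flag : Bool) (H W : Nat) (g : List (List String)) (y x i : Nat) :
    ((pvStepA arr ready ready_flag rain rain_flag H W g y x).getD i []).length = (g.getD i []).length := by
  simp only [pvStepA, List.foldl]
  split_ifs with h1 h2 h3
  · rw [pvRowLen_gSet, pvRowLen_touch, pvRowLen_touch, pvRowLen_touch, pvRowLen_touch]
  · rw [pvRowLen_gSet]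
  · rw [pvRowLen_touch, pvRowLen_touch, pvRowLen_touch, pvRowLen_touch]
  · rfl

-- under Pre_, any rain-write stores the unique value of its cell
theorem pvNoConflict (arr : List (List String)) (ready : String) (ready_flag : Bool)
    (rain : String) (rain_flag : Bool)
    (hconf : ¬(rain = "." ∧ rain_flag = true ∧ ready_flag = true ∧
      ∃ y < arr.length, ∃ x < (arr.getD 0 []).length,
        pvGGet arr y x = "." ∧
        pvHasReadyNbr arr ready arr.length ((arr.getD 0 []).length) y x = true))
    (i j : Nat) (hi : i < arr.length) (hj : j < (arr.getD 0 []).length)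
    (hrainij : pvGGet arr i j = rain) (hgf : rain_flag = true) :
    pvVal arr ready ready_flag arr.length ((arr.getD 0 []).length) i j = "*" := by
  unfold pvVal
  rw [if_neg]
  rintro ⟨hdot, hrf, hnbr⟩
  exact hconf ⟨by rw [← hrainij, hdot], hgf, hrf, i, hi, j, hj, hdot, hnbr⟩

-- effect of one step of A's sweep on one in-grid cell
theorem pvGGet_step (arr : List (List String)) (ready : String) (ready_flag : Bool)
    (rain : String) (rain_flag : Bool)
    (hW : ∀ t, t < arr.length → (arr.getD 0 []).length ≤ (arr.getD t []).length)
    (hconf : ¬(rain = "." ∧ rain_flag = true ∧ ready_flag = true ∧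
      ∃ y < arr.length, ∃ x < (arr.getD 0 []).length,
        pvGGet arr y x = "." ∧
        pvHasReadyNbr arr ready arr.length ((arr.getD 0 []).length) y x = true))
    (g : List (List String)) (y x i j : Nat)
    (hy : y < arr.length) (hx : x < (arr.getD 0 []).length)
    (hi : i < arr.length) (hj : j < (arr.getD 0 []).length)
    (hlen : g.length = arr.length) (hrl : ∀ t, (g.getD t []).length = (arr.getD t []).length) :
    ((pvWrites arr ready ready_flag rain rain_flag (y, x) i j →
        pvGGet (pvStepA arr ready ready_flag rain rain_flag arr.length ((arr.getD 0 []).length) g y x) i j =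
          pvVal arr ready ready_flag arr.length ((arr.getD 0 []).length) i j) ∧
     (¬ pvWrites arr ready ready_flag rain rain_flag (y, x) i j →
        pvGGet (pvStepA arr ready ready_flag rain rain_flag arr.length ((arr.getD 0 []).length) g y x) i j =
          pvGGet g i j)) := by
  have hnbrval : ∀ (hn : pvNbr y x i j) (hr : pvGGet arr y x = ready) (hrf : ready_flag = true)
      (hdot : pvGGet arr i j = "."),
      pvVal arr ready ready_flag arr.length ((arr.getD 0 []).length) i j = "+" := by
    intro hn hr hrf hdot
    unfold pvVal
    rw [if_pos ⟨hdot, hrf, (pvHasNbr_iff arr ready arr.length ((arr.getD 0 []).length) i j).2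
      ⟨y, x, hy, hx, hn, hr⟩⟩]
  simp only [pvStepA]
  by_cases hready : (pvGGet arr y x == ready && ready_flag) = true
  · simp only [if_pos hready]
    have hready' := hready
    simp only [beq_iff_eq, Bool.and_eq_true] at hready'
    obtain ⟨hre, hrf⟩ := hready'
    obtain ⟨hcp, hcn⟩ := pvGGet_chain arr g y x i j hW hi hj hlen hrl
    by_cases hrain : (pvGGet arr y x == rain && rain_flag) = true
    · simp only [if_pos hrain]
      have hrain' := hrain
      simp only [beq_iff_eq, Bool.and_eq_true] at hrain'
      obtain ⟨hra, hgf⟩ := hrain'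
      by_cases hij : i = y ∧ j = x
      · obtain ⟨rfl, rfl⟩ := hij
        rw [pvGGet_gSet _ i j i j "*"
            (by simp only [List.foldl]
                rw [pvLen_touch, pvLen_touch, pvLen_touch, pvLen_touch, hlen]; exact hi)
            (by simp only [List.foldl]
                rw [pvRowLen_touch, pvRowLen_touch, pvRowLen_touch, pvRowLen_touch, hrl]
                have := hW i hi; omega)]
        simp only [and_self, if_pos]
        constructor
        · intro _
          exact (pvNoConflict arr ready ready_flag rain rain_flag hconf i j hi hj hra hgf).symm
        · intro hno
          exact absurd (Or.inr ⟨rfl, rfl, hgf, hra⟩ :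
            pvWrites arr ready ready_flag rain rain_flag (i, j) i j) hno
      · rw [pvGGet_gSet_ne _ y x i j "*" hij]
        constructor
        · rintro (⟨_, _, hn, hdot⟩ | ⟨e1, e2, _⟩)
          · rw [hcp ⟨hn, hdot⟩]
            exact (hnbrval hn hre hrf hdot).symm
          · exact absurd ⟨e1, e2⟩ hij
        · intro hno
          exact hcn (fun ⟨hn, hdot⟩ => hno (Or.inl ⟨hrf, hre, hn, hdot⟩))
    · simp only [if_neg hrain]
      constructor
      · rintro (⟨_, _, hn, hdot⟩ | ⟨rfl, rfl, hgf, hra⟩)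
        · rw [hcp ⟨hn, hdot⟩]
          exact (hnbrval hn hre hrf hdot).symm
        · exact absurd (by rw [hra, hgf, beq_self_eq_true]; rfl) hrain
      · intro hno
        exact hcn (fun ⟨hn, hdot⟩ => hno (Or.inl ⟨hrf, hre, hn, hdot⟩))
  · simp only [if_neg hready]
    by_cases hrain : (pvGGet arr y x == rain && rain_flag) = true
    · simp only [if_pos hrain]
      have hrain' := hrain
      simp only [beq_iff_eq, Bool.and_eq_true] at hrain'
      obtain ⟨hra, hgf⟩ := hrain'
      by_cases hij : i = y ∧ j = x
      · obtain ⟨rfl, rfl⟩ := hij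
        rw [pvGGet_gSet g i j i j "*" (by omega) (by rw [hrl]; have := hW i hi; omega)]
        simp only [and_self, if_pos]
        constructor
        · intro _
          exact (pvNoConflict arr ready ready_flag rain rain_flag hconf i j hi hj hra hgf).symm
        · intro hno
          exact absurd (Or.inr ⟨rfl, rfl, hgf, hra⟩ :
            pvWrites arr ready ready_flag rain rain_flag (i, j) i j) hno
      · rw [pvGGet_gSet_ne g y x i j "*" hij]
        constructor
        · rintro (⟨hrf, hre, _⟩ | ⟨e1, e2, _⟩)
          · exact absurd (by rw [hre, hrf, beq_self_eq_true]; rfl) hready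
          · exact absurd ⟨e1, e2⟩ hij
        · intro _; trivial
    · simp only [if_neg hrain]
      constructor
      · rintro (⟨hrf, hre, _⟩ | ⟨rfl, rfl, hgf, hra⟩)
        · exact absurd (by rw [hre, hrf, beq_self_eq_true]; rfl) hready
        · exact absurd (by rw [hra, hgf, beq_self_eq_true]; rfl) hrain
      · intro _; trivial

-- cells with column index ≥ W are never written by a step
theorem pvGGet_step_hi (arr : List (List String)) (ready : String) (ready_flag : Bool)
    (rain : String) (rain_flag : Bool) (H W : Nat) (g : List (List String)) (y x i j : Nat)
    (hj : W ≤ j) (hx : x < W) :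
    pvGGet (pvStepA arr ready ready_flag rain rain_flag H W g y x) i j = pvGGet g i j := by
  simp only [pvStepA, List.foldl]
  split_ifs with h1 h2 h3
  · rw [pvGGet_gSet_ne _ y x i j "*" (by omega),
      pvGGet_touch_hi _ _ _ _ _ _ _ _ hj, pvGGet_touch_hi _ _ _ _ _ _ _ _ hj,
      pvGGet_touch_hi _ _ _ _ _ _ _ _ hj, pvGGet_touch_hi _ _ _ _ _ _ _ _ hj]
  · exact pvGGet_gSet_ne _ y x i j "*" (by omega)
  · rw [pvGGet_touch_hi _ _ _ _ _ _ _ _ hj, pvGGet_touch_hi _ _ _ _ _ _ _ _ hj,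
      pvGGet_touch_hi _ _ _ _ _ _ _ _ hj, pvGGet_touch_hi _ _ _ _ _ _ _ _ hj]
  · rfl

-- the sweep invariant is preserved along any list of in-grid cells
theorem pvInv_fold (arr : List (List String)) (ready : String) (ready_flag : Bool)
    (rain : String) (rain_flag : Bool)
    (hW : ∀ t, t < arr.length → (arr.getD 0 []).length ≤ (arr.getD t []).length)
    (hconf : ¬(rain = "." ∧ rain_flag = true ∧ ready_flag = true ∧
      ∃ y < arr.length, ∃ x < (arr.getD 0 []).length,
        pvGGet arr y x = "." ∧
        pvHasReadyNbr arr ready arr.length ((arr.getD 0 []).length) y x = true)) :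
    ∀ (l P : List (Nat × Nat)) (g : List (List String)),
      (∀ c ∈ l, c.1 < arr.length ∧ c.2 < (arr.getD 0 []).length) →
      pvInv arr ready ready_flag rain rain_flag P g →
      pvInv arr ready ready_flag rain rain_flag (P ++ l)
        (l.foldl (fun g c => pvStepA arr ready ready_flag rain rain_flag arr.length ((arr.getD 0 []).length) g c.1 c.2) g) := by
  intro l
  induction l with
  | nil => intro P g _ h; simpa using h
  | cons c l ih =>
    intro P g hmem hinv
    obtain ⟨hlen, hrl, hmid, hhi⟩ := hinv
    obtain ⟨hc1, hc2⟩ := hmem c List.mem_cons_self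
    have hstepinv : pvInv arr ready ready_flag rain rain_flag (P ++ [c])
        (pvStepA arr ready ready_flag rain rain_flag arr.length ((arr.getD 0 []).length) g c.1 c.2) := by
      refine ⟨by rw [pvLen_step]; exact hlen, fun i => by rw [pvRowLen_step]; exact hrl i, ?_, ?_⟩
      · intro i j hi hj
        obtain ⟨hw, hnw⟩ := pvGGet_step arr ready ready_flag rain rain_flag hW hconf g c.1 c.2 i j
          hc1 hc2 hi hj hlen hrl
        constructor
        · intro hex
          by_cases hcw : pvWrites arr ready ready_flag rain rain_flag c i j
          · exact hw hcw
          · rw [hnw hcw]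
            obtain ⟨c', hc'mem, hc'w⟩ := hex
            rcases List.mem_append.1 hc'mem with h | h
            · exact (hmid i j hi hj).1 ⟨c', h, hc'w⟩
            · simp only [List.mem_singleton] at h
              subst h
              exact absurd hc'w hcw
        · intro hnex
          have hcw : ¬ pvWrites arr ready ready_flag rain rain_flag c i j := by
            intro h
            exact hnex ⟨c, by simp, h⟩
          rw [hnw hcw]
          exact (hmid i j hi hj).2 (fun ⟨c', hm, hww⟩ => hnex ⟨c', by simp [hm], hww⟩)
      · intro i j hj
        rw [pvGGet_step_hi arr ready ready_flag rain rain_flag _ _ g c.1 c.2 i j hj hc2]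
        exact hhi i j hj
    have := ih (P ++ [c]) _ (fun c' h => hmem c' (List.mem_cons_of_mem _ h)) hstepinv
    simpa [List.append_assoc] using this

-- pvGGet read as a getElem, inside the grid
theorem pvGGet_eq_getElem (g : List (List String)) (i j : Nat)
    (hi : i < g.length) (hj : j < (g[i]'hi).length) :
    pvGGet g i j = (g[i]'hi)[j]'hj := by
  simp [pvGGet, List.getD_eq_getElem?_getD, hi, hj, List.getElem?_eq_getElem]

theorem pvRow_getD (g : List (List String)) (i : Nat) (hi : i < g.length) :
    g.getD i [] = g[i]'hi := by
  simp [List.getD_eq_getElem?_getD, List.getElem?_eq_getElem, hi]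

-- after the whole sweep, a cell was written iff it pulls a '+' or a '*'
theorem pvWrites_complete (arr : List (List String)) (ready : String) (ready_flag : Bool)
    (rain : String) (rain_flag : Bool) (i j : Nat)
    (hi : i < arr.length) (hj : j < (arr.getD 0 []).length) :
    ((∃ c ∈ (List.range arr.length).flatMap
        (fun y => (List.range ((arr.getD 0 []).length)).map (fun x => (y, x))),
        pvWrites arr ready ready_flag rain rain_flag c i j) ↔
      ((pvGGet arr i j = "." ∧ ready_flag = true ∧
          pvHasReadyNbr arr ready arr.length ((arr.getD 0 []).length) i j = true) ∨
       (rain_flag = true ∧ pvGGet arr i j = rain))) := by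
  constructor
  · rintro ⟨c, hc, hw⟩
    have hcm : c.1 < arr.length ∧ c.2 < (arr.getD 0 []).length := by
      simp only [List.mem_flatMap, List.mem_map, List.mem_range] at hc
      obtain ⟨y, hy, x, hx, rfl⟩ := hc
      exact ⟨hy, hx⟩
    rcases hw with ⟨hrf, hre, hn, hdot⟩ | ⟨e1, e2, hgf, hra⟩
    · exact Or.inl ⟨hdot, hrf,
        (pvHasNbr_iff arr ready arr.length ((arr.getD 0 []).length) i j).2
          ⟨c.1, c.2, hcm.1, hcm.2, hn, hre⟩⟩
    · exact Or.inr ⟨hgf, hra⟩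
  · rintro (⟨hdot, hrf, hnbr⟩ | ⟨hgf, hra⟩)
    · obtain ⟨p, q, hp, hq, hn, hr⟩ :=
        (pvHasNbr_iff arr ready arr.length ((arr.getD 0 []).length) i j).1 hnbr
      exact ⟨(p, q),
        List.mem_flatMap.2 ⟨p, List.mem_range.2 hp, List.mem_map.2 ⟨q, List.mem_range.2 hq, rfl⟩⟩,
        Or.inl ⟨hrf, hr, hn, hdot⟩⟩
    · exact ⟨(i, j),
        List.mem_flatMap.2 ⟨i, List.mem_range.2 hi, List.mem_map.2 ⟨j, List.mem_range.2 hj, rfl⟩⟩,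
        Or.inr ⟨rfl, rfl, hgf, hra⟩⟩

-- B's cell function, in propositional form
theorem pvCellB_eq (arr : List (List String)) (ready : String) (ready_flag : Bool)
    (rain : String) (rain_flag : Bool) (H W y x : Nat) :
    pvCellB arr ready ready_flag rain rain_flag H W y x =
      if pvGGet arr y x = "." ∧ ready_flag = true ∧ pvHasReadyNbr arr ready H W y x = true then "+"
      else if pvGGet arr y x = rain ∧ rain_flag = true then "*"
      else pvGGet arr y x := by
  simp only [pvCellB, Bool.and_eq_true, beq_iff_eq, and_assoc]

-- overwriting the first W cells of a row is the map over range W followed by the untouched tail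
theorem pvSet_foldl_range (f : Nat → String) :
    ∀ (W : Nat) (row : List String), W ≤ row.length →
      (List.range W).foldl (fun r x => r.set x (f x)) row = (List.range W).map f ++ row.drop W := by
  intro W
  induction W with
  | zero => intro row _; simp
  | succ W ih =>
    intro row hW
    have hlt : W < row.length := by omega
    rw [List.range_succ, List.foldl_append, List.map_append, ih row (by omega)]
    simp only [List.foldl_cons, List.foldl_nil, List.map_cons, List.map_nil]
    rw [List.set_append]
    simp only [List.length_map, List.length_range]
    rw [if_neg (by omega)]
    have h0 : W - W = 0 := by omega
    rw [h0, List.drop_eq_getElem_cons hlt, List.set_cons_zero]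
    simp

-- ===== VERDICT (by name: the statement is the Claim_ definition above) =====
theorem rain_controller_spec : Claim_equal_rain_controller := by
  intro arr ready ready_flag rain rain_flag _ hpre
  obtain ⟨hrows, hconf⟩ := hpre
  unfold Spec_rain_controller
  have hW : ∀ t, t < arr.length → (arr.getD 0 []).length ≤ (arr.getD t []).length := by
    intro t ht
    have hm : arr.getD t [] ∈ arr := by
      rw [pvRow_getD arr t ht]
      exact List.getElem_mem ht
    exact hrows _ hm
  have hA : rain_controller arr ready ready_flag rain rain_flag =
      ((List.range arr.length).flatMap
        (fun y => (List.range ((arr.getD 0 []).length)).map (fun x => (y, x)))).foldl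
        (fun g c => pvStepA arr ready ready_flag rain rain_flag arr.length ((arr.getD 0 []).length) g c.1 c.2) arr := by
    unfold rain_controller
    rw [List.foldl_flatMap]
    simp [List.foldl_map]
  have hinv := pvInv_fold arr ready ready_flag rain rain_flag hW hconf
      ((List.range arr.length).flatMap
        (fun y => (List.range ((arr.getD 0 []).length)).map (fun x => (y, x)))) [] arr
      (by intro c hc
          simp only [List.mem_flatMap, List.mem_map, List.mem_range] at hc
          obtain ⟨y, hy, x, hx, rfl⟩ := hc
          exact ⟨hy, hx⟩)
      (by refine ⟨rfl, fun i => rfl, ?_, fun i j _ => rfl⟩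
          intro i j hi hj
          exact ⟨fun ⟨c, hc, _⟩ => (List.not_mem_nil hc).elim, fun _ => rfl⟩)
  rw [← hA, List.nil_append] at hinv
  obtain ⟨hlen, hrl, hmid, hhi⟩ := hinv
  unfold rain_controller_alt
  apply List.ext_getElem
  · simp [hlen, PySem.List.length_enumerate]
  · intro i hiR hiB
    have hi : i < arr.length := by
      rw [List.length_map, PySem.List.length_enumerate] at hiB
      exact hiB
    rw [List.getElem_map, PySem.List.getElem_enumerate]
    have hyi : ((0 : Int) + (i : Int)).toNat = i := by omega
    rw [hyi]
    have hWle : (arr.getD 0 []).length ≤ (arr[i]'hi).length := by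
      have := hW i hi
      rwa [pvRow_getD arr i hi] at this
    rw [pvSet_foldl_range _ _ _ hWle]
    apply List.ext_getElem
    · have h1 : (rain_controller arr ready ready_flag rain rain_flag)[i].length =
          (arr.getD i []).length := by
        rw [← pvRow_getD _ i hiR]
        exact hrl i
      rw [h1, List.length_append, List.length_map, List.length_range, List.length_drop,
        pvRow_getD arr i hi]
      omega
    · intro j hjR hjB
      have hjlen : j < (arr.getD i []).length := by
        rw [← pvRow_getD _ i hiR, hrl i] at hjR
        exact hjR
      rw [← pvGGet_eq_getElem _ i j hiR]
      by_cases hj : j < (arr.getD 0 []).length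
      · rw [List.getElem_append_left (by simpa using hj), List.getElem_map, List.getElem_range,
          pvCellB_eq]
        have hcomp := pvWrites_complete arr ready ready_flag rain rain_flag i j hi hj
        obtain ⟨hwr, hnwr⟩ := hmid i j hi hj
        by_cases hpush : pvGGet arr i j = "." ∧ ready_flag = true ∧
            pvHasReadyNbr arr ready arr.length ((arr.getD 0 []).length) i j = true
        · rw [if_pos hpush, hwr (hcomp.2 (Or.inl hpush))]
          unfold pvVal
          rw [if_pos hpush]
        · rw [if_neg hpush]
          by_cases hstar : pvGGet arr i j = rain ∧ rain_flag = true
          · rw [if_pos hstar, hwr (hcomp.2 (Or.inr ⟨hstar.2, hstar.1⟩))]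
            unfold pvVal
            rw [if_neg hpush]
          · rw [if_neg hstar, hnwr]
            intro hex
            rcases hcomp.1 hex with h | h
            · exact hpush h
            · exact hstar ⟨h.2, h.1⟩
      · rw [List.getElem_append_right (by simpa using hj), hhi i j (by omega)]
        simp only [List.length_map, List.length_range]
        rw [List.getElem_drop]
        have he : (arr.getD 0 []).length + (j - (arr.getD 0 []).length) = j := by omega
        simp only [he]
        simp only [pvGGet, List.getD_eq_getElem?_getD] at hjlen ⊢
        rw [List.getElem?_eq_getElem hjlen]
        simp [List.getElem?_eq_getElem hi]
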